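-- pv_equiv track=rewrite | github.com/kittilsenstian-debug/the-hand | theory-tools/fano_from_arithmetic.py | f2_rank
-- ===== SOURCE A (Python) =====
-- def f2_rank(matrix):
--     """Compute rank over F_2 by Gaussian elimination."""
--     m = [list(row) for row in matrix]
--     nrows = len(m)
--     ncols = len(m[0]) if m else 0
--     rank = 0
--     for col in range(ncols):
--         # Find pivot
--         pivot = None
--         for row in range(rank, nrows):
--             if m[row][col] == 1:
--                 pivot = row
--                 break
--         if pivot is None:
--             continue
--         # Swap
--         m[rank], m[pivot] = m[pivot], m[rank]
--         # Eliminate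
--         for row in range(nrows):
--             if row != rank and m[row][col] == 1:
--                 m[row] = [(m[row][j] + m[rank][j]) % 2 for j in range(ncols)]
--         rank += 1
--     return rank, m
-- ===== SOURCE B (Python) =====
-- def f2_rank(matrix):
--     """Compute rank over F_2 by two-phase Gaussian elimination:
--     forward pass to row echelon form (eliminating only below each pivot,
--     recording pivot columns), then a back-substitution pass clearing the
--     entries above each pivot."""
--     m = [list(row) for row in matrix]
--     nrows = len(m)
--     ncols = len(m[0]) if m else 0
--     pivots = []  # pivot k (row index k) has its pivot in column pivots[k]
--     for col in range(ncols):
--         k = len(pivots)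
--         piv = next((r for r in range(k, nrows) if m[r][col] == 1), None)
--         if piv is None:
--             continue
--         m[k], m[piv] = m[piv], m[k]
--         for r in range(k + 1, nrows):
--             if m[r][col] == 1:
--                 m[r] = [(m[r][j] + m[k][j]) % 2 for j in range(ncols)]
--         pivots.append(col)
--     # back-substitution: clear above each pivot
--     for k in range(len(pivots)):
--         col = pivots[k]
--         for r in range(k):
--             if m[r][col] == 1:
--                 m[r] = [(m[r][j] + m[k][j]) % 2 for j in range(ncols)]
--     return len(pivots), m
-- ===== Notes on version B (the rewrite author's own statement) =====
-- stated objective: alternative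
-- what changed: A clears above and below each pivot in one combined sweep per column; B is a two-phase elimination: a forward pass to row echelon form (eliminating only below each pivot, recording pivot columns) followed by a separate back-substitution pass that clears the entries above each pivot.
-- outside the precondition, e.g. on f2_rank([[0, 0], [1]]): A returns (1, [[1], [0, 0]]), B returns (1, [[1], [0, 0]])
import Mathlib
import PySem

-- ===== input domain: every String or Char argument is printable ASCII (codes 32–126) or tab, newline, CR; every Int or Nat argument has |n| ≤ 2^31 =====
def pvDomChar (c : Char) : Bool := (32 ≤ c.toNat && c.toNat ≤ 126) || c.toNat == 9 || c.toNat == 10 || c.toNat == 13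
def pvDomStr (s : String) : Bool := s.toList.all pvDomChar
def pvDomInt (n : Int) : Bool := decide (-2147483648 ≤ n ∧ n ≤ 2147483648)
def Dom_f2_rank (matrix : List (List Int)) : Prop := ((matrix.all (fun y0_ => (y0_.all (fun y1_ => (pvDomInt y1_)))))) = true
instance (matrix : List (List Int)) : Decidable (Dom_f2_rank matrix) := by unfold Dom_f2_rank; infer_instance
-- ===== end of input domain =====

-- B replaces A's combined per-pivot sweep (clearing above and below at once) by a two-phase
-- elimination: a forward pass to row echelon form recording pivot columns, then a separate
-- back-substitution pass clearing above the pivots (objective: alternative decomposition).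
-- Indexing m[row][col] is ported with getD (exact on Pre_, where all accesses are in range).

-- ===== PORT A =====
-- row [(m[row][j] + m[rank][j]) % 2 for j in range(ncols)]  (shared by both Pythons verbatim)
def pvElimRow (src row : List Int) (ncols : Nat) : List Int :=
  (List.range ncols).map (fun j => PySem.Int.mod (row.getD j 0 + src.getD j 0) 2)

-- m[i], m[j] = m[j], m[i]
def pvSwap (m : List (List Int)) (i j : Nat) : List (List Int) :=
  (m.set i (m.getD j [])).set j (m.getD i [])

-- first r in range(k, nrows) with m[r][col] == 1 (both Pythons' pivot search)
def pvFind (m : List (List Int)) (col k nrows : Nat) : Option Nat :=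
  (List.range' k (nrows - k)).find? (fun r => (m.getD r []).getD col 0 == 1)

-- A's elimination sweep: 'for row in range(nrows): if row != rank and m[row][col] == 1: …'
def pvSweepA (col rank ncols nrows : Nat) (m : List (List Int)) : List (List Int) :=
  (List.range nrows).foldl (fun acc row =>
    if (row != rank) && ((acc.getD row []).getD col 0 == 1) then
      acc.set row (pvElimRow (acc.getD rank []) (acc.getD row []) ncols)
    else acc) m

-- one iteration of A's 'for col in range(ncols)' loop, state (rank, m)
def pvStepA (ncols nrows : Nat) (st : Nat × List (List Int)) (col : Nat) : Nat × List (List Int) :=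
  match pvFind st.2 col st.1 nrows with
  | none => st
  | some p => (st.1 + 1, pvSweepA col st.1 ncols nrows (pvSwap st.2 st.1 p))

def f2_rank (matrix : List (List Int)) : Int × List (List Int) :=
  let m := matrix.map (fun row => row)
  let nrows := m.length
  let ncols := match m with | [] => 0 | r :: _ => r.length
  let st := (List.range ncols).foldl (pvStepA ncols nrows) (0, m)
  ((st.1 : Int), st.2)

-- ===== PORT B =====
-- 'if m[r][col] == 1: m[r] = [(m[r][j] + m[src][j]) % 2 for j in range(ncols)]'
def pvRowStep (src col ncols : Nat) (acc : List (List Int)) (r : Nat) : List (List Int) :=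
  if (acc.getD r []).getD col 0 == 1 then
    acc.set r (pvElimRow (acc.getD src []) (acc.getD r []) ncols)
  else acc

-- B's forward elimination: 'for r in range(k + 1, nrows): …'
def pvElimBelow (m : List (List Int)) (col k ncols nrows : Nat) : List (List Int) :=
  (List.range' (k + 1) (nrows - (k + 1))).foldl (pvRowStep k col ncols) m

-- B's back-substitution step for pivot k: 'for r in range(k): …'
def pvClearAbove (m : List (List Int)) (col k ncols : Nat) : List (List Int) :=
  (List.range k).foldl (pvRowStep k col ncols) m

-- one iteration of B's forward loop, state (pivots, m)
def pvStepB (ncols nrows : Nat) (st : List Nat × List (List Int)) (col : Nat) : List Nat × List (List Int) :=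
  match pvFind st.2 col st.1.length nrows with
  | none => st
  | some p => (st.1 ++ [col], pvElimBelow (pvSwap st.2 st.1.length p) col st.1.length ncols nrows)

def f2_rank_alt (matrix : List (List Int)) : Int × List (List Int) :=
  let m := matrix.map (fun row => row)
  let nrows := m.length
  let ncols := match m with | [] => 0 | r :: _ => r.length
  let st := (List.range ncols).foldl (pvStepB ncols nrows) ([], m)
  let m2 := (List.range st.1.length).foldl (fun mm k => pvClearAbove mm (st.1.getD k 0) k ncols) st.2
  ((st.1.length : Int), m2)

-- ===== PRECONDITION & SPEC =====
-- Pre_ excludes ragged matrices (a row shorter than the first row): on those A almost always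
-- raises IndexError; in the rare ragged cases where A still returns, B returns the same value.
def Pre_f2_rank (matrix : List (List Int)) : Prop :=
  ∀ row ∈ matrix, (match matrix with | [] => 0 | r :: _ => r.length) ≤ row.length
instance (matrix : List (List Int)) : Decidable (Pre_f2_rank matrix) := by
  unfold Pre_f2_rank; infer_instance

def pvWitness_f2_rank : List (List Int) := [[1, 0, 1], [1, 1, 1], [0, 1, 1]]

def Spec_f2_rank (matrix : List (List Int)) (out : Int × List (List Int)) : Prop := out = f2_rank_alt matrix
instance (matrix : List (List Int)) (out : Int × List (List Int)) : Decidable (Spec_f2_rank matrix out) := by unfold Spec_f2_rank; infer_instance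

-- ===== CLAIM (what is proved, stated in full; the proofs are below) =====
def Claim_equal_f2_rank : Prop := ∀ (matrix : List (List Int)), Dom_f2_rank matrix → Pre_f2_rank matrix → Spec_f2_rank matrix (f2_rank matrix)

-- ===== LEMMAS AND PROOFS =====

-- back-substitution, structurally on the pivot-column list (proof-side model of B's phase 2)
def pvBS (ncols : Nat) : List Nat → Nat → List (List Int) → List (List Int)
  | [], _, m => m
  | c :: P, k, m => pvBS ncols P (k + 1) (pvClearAbove m c k ncols)

lemma pvGetD_set_ne (m : List (List Int)) (i r : Nat) (v : List Int) (h : r ≠ i) :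
    (m.set i v).getD r [] = m.getD r [] := by
  simp [List.getD_eq_getElem?_getD, List.getElem?_set_ne (Ne.symm h)]

lemma pvGetD_set_self (m : List (List Int)) (i : Nat) (v : List Int) (h : i < m.length) :
    (m.set i v).getD i [] = v := by
  simp [List.getD_eq_getElem?_getD, h]

lemma pvRowStep_length (src col ncols : Nat) (acc : List (List Int)) (r : Nat) :
    (pvRowStep src col ncols acc r).length = acc.length := by
  unfold pvRowStep; split <;> simp

lemma pass_length (src col ncols : Nat) (L : List Nat) (m : List (List Int)) :
    (L.foldl (pvRowStep src col ncols) m).length = m.length := by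
  induction L generalizing m with
  | nil => rfl
  | cons a L ih => simp [List.foldl_cons, ih, pvRowStep_length]

lemma pvRowStep_getD (src col ncols : Nat) (m : List (List Int)) (a : Nat)
    (ha : a < m.length) (r : Nat) :
    (pvRowStep src col ncols m a).getD r [] =
      if r = a ∧ ((m.getD a []).getD col 0 == 1) = true
      then pvElimRow (m.getD src []) (m.getD a []) ncols
      else m.getD r [] := by
  unfold pvRowStep
  split
  · next hc =>
    by_cases hr : r = a
    · subst hr; rw [pvGetD_set_self _ _ _ ha, if_pos ⟨rfl, hc⟩]
    · rw [pvGetD_set_ne _ _ _ _ hr, if_neg (fun h => hr h.1)]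
  · next hc =>
    rw [if_neg (fun h => hc h.2)]

lemma pass_getD_notmem (src col ncols : Nat) (L : List Nat) (m : List (List Int))
    (r : Nat) (hr : r ∉ L) :
    (L.foldl (pvRowStep src col ncols) m).getD r [] = m.getD r [] := by
  induction L generalizing m with
  | nil => rfl
  | cons a L ih =>
    simp only [List.mem_cons, not_or] at hr
    rw [List.foldl_cons, ih _ hr.2]
    unfold pvRowStep
    split
    · exact pvGetD_set_ne _ _ _ _ hr.1
    · rfl

lemma pass_getD (src col ncols : Nat) (L : List Nat) (m : List (List Int))
    (hnd : L.Nodup) (hsrc : src ∉ L) (hlt : ∀ x ∈ L, x < m.length) (r : Nat) :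
    (L.foldl (pvRowStep src col ncols) m).getD r [] =
      if r ∈ L ∧ ((m.getD r []).getD col 0 == 1) = true
      then pvElimRow (m.getD src []) (m.getD r []) ncols
      else m.getD r [] := by
  induction L generalizing m with
  | nil => simp
  | cons a L ih =>
    have hsrc' : src ≠ a ∧ src ∉ L := by simpa [not_or] using hsrc
    rw [List.nodup_cons] at hnd
    have ha : a < m.length := hlt a List.mem_cons_self
    rw [List.foldl_cons]
    have hm1len : (pvRowStep src col ncols m a).length = m.length := pvRowStep_length ..
    rw [ih (pvRowStep src col ncols m a) hnd.2 hsrc'.2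
        (fun x hx => by rw [hm1len]; exact hlt x (List.mem_cons_of_mem _ hx))]
    have hsrcD : (pvRowStep src col ncols m a).getD src [] = m.getD src [] := by
      rw [pvRowStep_getD _ _ _ _ _ ha, if_neg]
      rintro ⟨h, -⟩; exact hsrc'.1 h
    by_cases hrL : r ∈ L
    · have hra : r ≠ a := fun h => hnd.1 (h ▸ hrL)
      have hrD : (pvRowStep src col ncols m a).getD r [] = m.getD r [] := by
        rw [pvRowStep_getD _ _ _ _ _ ha, if_neg]
        rintro ⟨h, -⟩; exact hra h
      rw [hrD, hsrcD]
      simp only [hrL, List.mem_cons, or_true, true_and]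
    · by_cases hra : r = a
      · subst hra
        rw [if_neg (fun h => hrL h.1), pvRowStep_getD _ _ _ _ _ ha]
        simp only [List.mem_cons, true_or, true_and]
      · have hrD : (pvRowStep src col ncols m a).getD r [] = m.getD r [] := by
          rw [pvRowStep_getD _ _ _ _ _ ha, if_neg]
          rintro ⟨h, -⟩; exact hra h
        rw [if_neg (fun h => hrL h.1), hrD, if_neg]
        rintro ⟨h, -⟩
        rcases List.mem_cons.mp h with h' | h'
        · exact hra h'
        · exact hrL h'

lemma mat_ext {m1 m2 : List (List Int)} (hl : m1.length = m2.length)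
    (h : ∀ r : Nat, m1.getD r [] = m2.getD r []) : m1 = m2 := by
  apply List.ext_getElem hl
  intro i h1 h2
  have := h i
  rwa [List.getD_eq_getElem _ _ h1, List.getD_eq_getElem _ _ h2] at this

-- pointwise characterisations -------------------------------------------------

lemma clearAbove_length (m : List (List Int)) (col k ncols : Nat) :
    (pvClearAbove m col k ncols).length = m.length := pass_length ..

lemma elimBelow_length (m : List (List Int)) (col k ncols nrows : Nat) :
    (pvElimBelow m col k ncols nrows).length = m.length := pass_length ..

lemma swap_length (m : List (List Int)) (i j : Nat) : (pvSwap m i j).length = m.length := by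
  simp [pvSwap]

lemma clearAbove_getD (m : List (List Int)) (col k ncols : Nat) (hk : k ≤ m.length) (r : Nat) :
    (pvClearAbove m col k ncols).getD r [] =
      if r < k ∧ ((m.getD r []).getD col 0 == 1) = true
      then pvElimRow (m.getD k []) (m.getD r []) ncols
      else m.getD r [] := by
  rw [pvClearAbove, pass_getD _ _ _ _ _ (List.nodup_range)
    (by simp) (fun x hx => lt_of_lt_of_le (List.mem_range.mp hx) hk) r]
  simp only [List.mem_range]

lemma clearAbove_getD_ge (m : List (List Int)) (col k ncols : Nat) (r : Nat) (h : k ≤ r) :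
    (pvClearAbove m col k ncols).getD r [] = m.getD r [] :=
  pass_getD_notmem _ _ _ _ _ _ (by simp [List.mem_range]; omega)

lemma elimBelow_getD (m : List (List Int)) (col K ncols nrows : Nat)
    (hn : m.length = nrows) (r : Nat) :
    (pvElimBelow m col K ncols nrows).getD r [] =
      if (K < r ∧ r < nrows) ∧ ((m.getD r []).getD col 0 == 1) = true
      then pvElimRow (m.getD K []) (m.getD r []) ncols
      else m.getD r [] := by
  rw [pvElimBelow, pass_getD _ _ _ _ _ (List.nodup_range')
    (by intro h; have := List.mem_range'_1.mp h; omega)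
    (fun x hx => by have := List.mem_range'_1.mp hx; omega) r]
  have hmem : r ∈ List.range' (K + 1) (nrows - (K + 1)) ↔ (K < r ∧ r < nrows) := by
    rw [List.mem_range'_1]; omega
  simp only [hmem]

lemma swap_getD (m : List (List Int)) (i j : Nat) (hi : i < m.length) (hj : j < m.length)
    (r : Nat) :
    (pvSwap m i j).getD r [] =
      if r = j then m.getD i [] else if r = i then m.getD j [] else m.getD r [] := by
  unfold pvSwap
  by_cases hrj : r = j
  · subst hrj; rw [pvGetD_set_self _ _ _ (by simpa using hj)]; simp
  · rw [pvGetD_set_ne _ _ _ _ hrj]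
    by_cases hri : r = i
    · subst hri; rw [pvGetD_set_self _ _ _ hi]; simp [hrj]
    · rw [pvGetD_set_ne _ _ _ _ hri]; simp [hri, hrj]

lemma sweepA_eq_pass (col rank ncols nrows : Nat) (m : List (List Int)) :
    pvSweepA col rank ncols nrows m =
      ((List.range nrows).filter (fun r => r != rank)).foldl (pvRowStep rank col ncols) m := by
  rw [pvSweepA]
  have h1 : (List.range nrows).foldl (fun acc row =>
      if (row != rank) && ((acc.getD row []).getD col 0 == 1) then
        acc.set row (pvElimRow (acc.getD rank []) (acc.getD row []) ncols)
      else acc) m =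
      (List.range nrows).foldl (fun acc row =>
        if (row != rank) then pvRowStep rank col ncols acc row else acc) m := by
    apply PySem.List.foldl_congr_mem
    intro acc x _
    by_cases h : (x != rank) = true
    · simp only [h, Bool.true_and, if_true]; rfl
    · simp only [h, Bool.false_and]
      simp only [Bool.not_eq_true] at h
      simp
  rw [h1, PySem.List.foldl_if_eq_foldl_filter]

lemma sweepA_length (col rank ncols nrows : Nat) (m : List (List Int)) :
    (pvSweepA col rank ncols nrows m).length = m.length := by
  rw [sweepA_eq_pass]; exact pass_length ..

lemma sweepA_getD (col rank ncols nrows : Nat) (m : List (List Int))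
    (hn : m.length = nrows) (r : Nat) :
    (pvSweepA col rank ncols nrows m).getD r [] =
      if (r < nrows ∧ r ≠ rank) ∧ ((m.getD r []).getD col 0 == 1) = true
      then pvElimRow (m.getD rank []) (m.getD r []) ncols
      else m.getD r [] := by
  rw [sweepA_eq_pass, pass_getD _ _ _ _ _ (List.Nodup.filter _ List.nodup_range)
    (by simp) (fun x hx => by simp only [List.mem_filter, List.mem_range] at hx; omega) r]
  have hmem : (r ∈ (List.range nrows).filter (fun r => r != rank)) ↔ (r < nrows ∧ r ≠ rank) := by
    simp [List.mem_filter, List.mem_range]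
  simp only [hmem]

-- pvBS basics -----------------------------------------------------------------

lemma pvBS_length (ncols : Nat) (P : List Nat) : ∀ (k : Nat) (m : List (List Int)),
    (pvBS ncols P k m).length = m.length := by
  induction P with
  | nil => intro k m; rfl
  | cons c P ih => intro k m; rw [pvBS, ih, clearAbove_length]

lemma pvBS_getD_high (ncols : Nat) (P : List Nat) : ∀ (k : Nat) (m : List (List Int)) (r : Nat),
    k + P.length ≤ r → (pvBS ncols P k m).getD r [] = m.getD r [] := by
  induction P with
  | nil => intro k m r _; rfl
  | cons c P ih =>
    intro k m r hr
    simp only [List.length_cons] at hr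
    rw [pvBS, ih (k + 1) _ r (by omega), clearAbove_getD_ge _ _ _ _ _ (by omega)]

lemma pvBS_append (ncols : Nat) (P : List Nat) (c : Nat) : ∀ (k : Nat) (m : List (List Int)),
    pvBS ncols (P ++ [c]) k m = pvClearAbove (pvBS ncols P k m) c (k + P.length) ncols := by
  induction P with
  | nil => intro k m; simp [pvBS]
  | cons a P ih =>
    intro k m
    rw [List.cons_append, pvBS, pvBS, ih]
    simp [Nat.add_assoc, Nat.add_comm 1]

-- commutations ----------------------------------------------------------------

lemma clear_swap_comm (m : List (List Int)) (c k a b ncols : Nat)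
    (hka : k < a) (hkb : k < b) (ha : a < m.length) (hb : b < m.length) :
    pvClearAbove (pvSwap m a b) c k ncols = pvSwap (pvClearAbove m c k ncols) a b := by
  have hsl : (pvSwap m a b).length = m.length := swap_length ..
  have hcl : (pvClearAbove m c k ncols).length = m.length := clearAbove_length ..
  apply mat_ext (by rw [clearAbove_length, hsl, swap_length, hcl])
  intro r
  rw [clearAbove_getD (pvSwap m a b) c k ncols (by omega) r,
      swap_getD (pvClearAbove m c k ncols) a b (by omega) (by omega) r,
      swap_getD m a b ha hb k, swap_getD m a b ha hb r,
      clearAbove_getD m c k ncols (by omega) a,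
      clearAbove_getD m c k ncols (by omega) b,
      clearAbove_getD m c k ncols (by omega) r]
  have h1 : ¬ (b < k) := by omega
  have h2 : ¬ (a < k) := by omega
  have h3 : ¬ (k = b) := by omega
  have h4 : ¬ (k = a) := by omega
  by_cases hrb : r = b
  · subst hrb; simp [h1, h2]
  · by_cases hra : r = a
    · subst hra; simp [h1, h2, hrb]
    · simp [h3, h4, hra, hrb]

lemma pvBS_swap_comm (ncols : Nat) (P : List Nat) (a b : Nat) :
    ∀ (k : Nat) (m : List (List Int)), k + P.length ≤ a → k + P.length ≤ b →
      a < m.length → b < m.length →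
      pvBS ncols P k (pvSwap m a b) = pvSwap (pvBS ncols P k m) a b := by
  induction P with
  | nil => intro k m _ _ _ _; rfl
  | cons c P ih =>
    intro k m hka hkb ha hb
    simp only [List.length_cons] at hka hkb
    rw [pvBS, pvBS, clear_swap_comm _ _ _ _ _ _ (by omega) (by omega) ha hb,
        ih (k + 1) _ (by omega) (by omega) (by rw [clearAbove_length]; omega)
          (by rw [clearAbove_length]; omega)]

lemma clear_elimBelow_comm (m : List (List Int)) (c col k K ncols nrows : Nat)
    (hkK : k ≤ K) (hn : m.length = nrows) (hK : K < nrows) :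
    pvClearAbove (pvElimBelow m col K ncols nrows) c k ncols =
      pvElimBelow (pvClearAbove m c k ncols) col K ncols nrows := by
  apply mat_ext (by rw [clearAbove_length, elimBelow_length, elimBelow_length, clearAbove_length])
  intro r
  rw [clearAbove_getD (pvElimBelow m col K ncols nrows) c k ncols
        (by rw [elimBelow_length]; omega) r,
      elimBelow_getD (pvClearAbove m c k ncols) col K ncols nrows
        (by rw [clearAbove_length]; exact hn) r,
      elimBelow_getD m col K ncols nrows hn k,
      elimBelow_getD m col K ncols nrows hn r,
      clearAbove_getD m c k ncols (by omega) K,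
      clearAbove_getD m c k ncols (by omega) r]
  have h1 : ¬ (K < k) := by omega
  by_cases hrk : r < k
  · have hKr : ¬ K < r := by omega
    simp [hrk, h1, hKr]
  · by_cases hKr : K < r
    · by_cases hrn : r < nrows
      · simp [hrk, hKr, hrn, h1]
      · simp [hrk, hKr, hrn]
    · simp [hrk, hKr]

lemma pvBS_elimBelow_comm (ncols : Nat) (P : List Nat) (col K nrows : Nat) (hK : K < nrows) :
    ∀ (k : Nat) (m : List (List Int)), k + P.length ≤ K + 1 → m.length = nrows →
      pvBS ncols P k (pvElimBelow m col K ncols nrows) =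
        pvElimBelow (pvBS ncols P k m) col K ncols nrows := by
  induction P with
  | nil => intro k m _ _; rfl
  | cons c P ih =>
    intro k m hP hn
    simp only [List.length_cons] at hP
    rw [pvBS, pvBS, clear_elimBelow_comm _ _ _ _ _ _ _ (by omega) hn hK,
        ih (k + 1) _ (by omega) (by rw [clearAbove_length]; exact hn)]

lemma sweep_decompose (m : List (List Int)) (col k ncols nrows : Nat)
    (hk : k < nrows) (hn : m.length = nrows) :
    pvSweepA col k ncols nrows m =
      pvElimBelow (pvClearAbove m col k ncols) col k ncols nrows := by
  apply mat_ext (by rw [sweepA_length, elimBelow_length, clearAbove_length])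
  intro r
  rw [sweepA_getD col k ncols nrows m hn r,
      elimBelow_getD (pvClearAbove m col k ncols) col k ncols nrows
        (by rw [clearAbove_length]; exact hn) r,
      clearAbove_getD m col k ncols (by omega) k,
      clearAbove_getD m col k ncols (by omega) r]
  by_cases hrk : r < k
  · have e1 : ¬ k < r := by omega
    have e2 : r < nrows := by omega
    have e3 : ¬ r = k := by omega
    simp [hrk, e1, e2, e3]
  · by_cases hkr : k < r
    · by_cases hrn : r < nrows
      · have e3 : ¬ r = k := by omega
        simp [hrk, hkr, hrn, e3]
      · simp [hrk, hkr, hrn]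
    · have hrkk : r = k := by omega
      subst hrkk
      simp

-- find? congruence ------------------------------------------------------------

lemma find?_congr {α : Type} (l : List α) (p q : α → Bool)
    (h : ∀ x ∈ l, p x = q x) : l.find? p = l.find? q := by
  induction l with
  | nil => rfl
  | cons a l ih =>
    rw [List.find?_cons, List.find?_cons, h a List.mem_cons_self]
    split
    · rfl
    · exact ih (fun x hx => h x (List.mem_cons_of_mem _ hx))

lemma pvFind_pvBS (ncols : Nat) (P : List Nat) (m : List (List Int)) (col nrows : Nat) :
    pvFind (pvBS ncols P 0 m) col P.length nrows = pvFind m col P.length nrows := by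
  unfold pvFind
  apply find?_congr
  intro r hr
  have := List.mem_range'_1.mp hr
  rw [pvBS_getD_high _ _ _ _ _ (by omega)]

-- main loop invariant ---------------------------------------------------------

lemma loop_eq (ncols nrows : Nat) (cols : List Nat) :
    ∀ (P : List Nat) (m : List (List Int)), m.length = nrows → P.length ≤ nrows →
      List.foldl (pvStepA ncols nrows) (P.length, pvBS ncols P 0 m) cols =
        ((List.foldl (pvStepB ncols nrows) (P, m) cols).1.length,
          pvBS ncols (List.foldl (pvStepB ncols nrows) (P, m) cols).1 0
            (List.foldl (pvStepB ncols nrows) (P, m) cols).2) := by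
  induction cols with
  | nil => intro P m _ _; rfl
  | cons col cols ih =>
    intro P m hn hP
    rw [List.foldl_cons, List.foldl_cons]
    have hfind := pvFind_pvBS ncols P m col nrows
    rcases hcase : pvFind m col P.length nrows with _ | p
    · have hA : pvStepA ncols nrows (P.length, pvBS ncols P 0 m) col =
          (P.length, pvBS ncols P 0 m) := by
        simp [pvStepA, hfind, hcase]
      have hB : pvStepB ncols nrows (P, m) col = (P, m) := by
        simp [pvStepB, hcase]
      rw [hA, hB]; exact ih P m hn hP
    · have hpmem := List.mem_range'_1.mp (List.mem_of_find?_eq_some hcase)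
      have hpk : P.length ≤ p := hpmem.1
      have hpn : p < nrows := by omega
      have hkn : P.length < nrows := by omega
      have hA : pvStepA ncols nrows (P.length, pvBS ncols P 0 m) col =
          (P.length + 1,
            pvSweepA col P.length ncols nrows (pvSwap (pvBS ncols P 0 m) P.length p)) := by
        simp [pvStepA, hfind, hcase]
      have hB : pvStepB ncols nrows (P, m) col =
          (P ++ [col], pvElimBelow (pvSwap m P.length p) col P.length ncols nrows) := by
        simp [pvStepB, hcase]
      rw [hA, hB]
      have hswap : pvSwap (pvBS ncols P 0 m) P.length p =
          pvBS ncols P 0 (pvSwap m P.length p) :=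
        (pvBS_swap_comm ncols P P.length p 0 m (by omega) (by omega) (by omega) (by omega)).symm
      have hs1 : (pvSwap m P.length p).length = nrows := by rw [swap_length]; exact hn
      have hsweep : pvSweepA col P.length ncols nrows (pvBS ncols P 0 (pvSwap m P.length p)) =
          pvBS ncols (P ++ [col]) 0
            (pvElimBelow (pvSwap m P.length p) col P.length ncols nrows) := by
        rw [sweep_decompose _ _ _ _ _ hkn (by rw [pvBS_length]; exact hs1)]
        have hca : pvClearAbove (pvBS ncols P 0 (pvSwap m P.length p)) col P.length ncols =
            pvBS ncols (P ++ [col]) 0 (pvSwap m P.length p) := by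
          rw [pvBS_append]; simp
        rw [hca, pvBS_elimBelow_comm ncols (P ++ [col]) col P.length nrows hkn 0 _
            (by simp) hs1]
      rw [hswap, hsweep]
      have := ih (P ++ [col]) (pvElimBelow (pvSwap m P.length p) col P.length ncols nrows)
        (by rw [elimBelow_length]; exact hs1) (by simp; omega)
      simpa using this

-- B's phase 2 equals pvBS -----------------------------------------------------

lemma phase2_eq (ncols : Nat) (P : List Nat) (m : List (List Int)) :
    (List.range P.length).foldl (fun mm k => pvClearAbove mm (P.getD k 0) k ncols) m =
      pvBS ncols P 0 m := by
  induction P using List.reverseRecOn generalizing m with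
  | nil => rfl
  | append_singleton Q c ih =>
    rw [List.length_append, List.length_singleton, List.range_succ, List.foldl_append]
    have hcongr : (List.range Q.length).foldl
        (fun mm k => pvClearAbove mm ((Q ++ [c]).getD k 0) k ncols) m =
        (List.range Q.length).foldl (fun mm k => pvClearAbove mm (Q.getD k 0) k ncols) m := by
      apply PySem.List.foldl_congr_mem
      intro acc x hx
      rw [List.getD_append _ _ _ _ (List.mem_range.mp hx)]
    rw [hcongr, ih, pvBS_append]
    simp

-- ===== VERDICT (by name: the statement is the Claim_ definition above) =====
theorem f2_rank_spec : Claim_equal_f2_rank := by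
  intro matrix _ _
  show f2_rank matrix = f2_rank_alt matrix
  cases matrix with
  | nil => rfl
  | cons row rest =>
    simp only [f2_rank, f2_rank_alt, List.map_id']
    have h := loop_eq row.length (row :: rest).length (List.range row.length) [] (row :: rest)
      rfl (by simp)
    simp only [List.length_nil] at h
    rw [show pvBS row.length [] 0 (row :: rest) = row :: rest from rfl] at h
    rw [h, phase2_eq]
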